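-- pv_equiv track=rewrite | github.com/terry-dactle/KiComport | v1/backend/services/importer.py | _symbol_name
-- ===== SOURCE A (Python) =====
-- def _symbol_name(symbol_block: str) -> str:
--     text = symbol_block.lstrip()
--     if not text.startswith("(symbol"):
--         return ""
--     i = len("(symbol")
--     while i < len(text) and text[i].isspace():
--         i += 1
--     if i >= len(text):
--         return ""
--     if text[i] == '"':
--         i += 1
--         buf: list[str] = []
--         esc = False
--         while i < len(text):
--             ch = text[i]
--             if esc:
--                 buf.append(ch)
--                 esc = False
--             elif ch == "\\":
--                 esc = True
--             elif ch == '"':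
--                 break
--             else:
--                 buf.append(ch)
--             i += 1
--         return "".join(buf).strip()
--     start = i
--     while i < len(text) and (not text[i].isspace()) and text[i] not in "()":
--         i += 1
--     return text[start:i].strip()
-- ===== SOURCE B (Python) =====
-- def _unquote(s: str) -> str:
--     # content of a quoted name: stop at the first unescaped quote,
--     # an escaped character stands for itself, a trailing lone backslash is dropped
--     if not s or s[0] == '"':
--         return ''
--     if s[0] == '\\':
--         return s[1:2] + _unquote(s[2:])
--     return s[0] + _unquote(s[1:])
--
--
-- def _symbol_name(symbol_block: str) -> str:
--     text = symbol_block.lstrip()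
--     if not text.startswith("(symbol"):
--         return ""
--     rest = text[len("(symbol"):].lstrip()
--     if rest.startswith('"'):
--         return _unquote(rest[1:]).strip()
--     j = next((k for k, ch in enumerate(rest) if ch.isspace() or ch in "()"), len(rest))
--     return rest[:j].strip()
-- ===== Notes on version B (the rewrite author's own statement) =====
-- stated objective: simpler
-- what changed: Replaces A's index-walking escape state machine (manual i cursor, esc flag, buf accumulator) with slicing plus lstrip for the header, a direct structural recursion for the quoted-name unescape, and a single next/enumerate scan for the bare token.
import Mathlib
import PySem

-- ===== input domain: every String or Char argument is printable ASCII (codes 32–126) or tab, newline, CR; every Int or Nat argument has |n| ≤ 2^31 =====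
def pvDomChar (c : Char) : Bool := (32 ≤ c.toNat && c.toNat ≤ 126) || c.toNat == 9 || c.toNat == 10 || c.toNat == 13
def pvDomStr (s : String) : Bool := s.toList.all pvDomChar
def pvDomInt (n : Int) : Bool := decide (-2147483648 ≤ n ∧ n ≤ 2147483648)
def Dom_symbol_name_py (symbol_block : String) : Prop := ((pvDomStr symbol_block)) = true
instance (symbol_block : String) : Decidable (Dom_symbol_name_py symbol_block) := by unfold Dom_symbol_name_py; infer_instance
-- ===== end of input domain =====

-- B replaces A's index-based escape state machine by slicing, lstrip and a direct
-- structural recursion for the quoted-name unescape (objective: simpler decomposition, same cost).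

-- ===== PORT A =====
-- 'while i < len(text) and text[i].isspace(): i += 1' on the remaining characters
def aSkipWs : List Char → List Char
  | [] => []
  | c :: cs => if PySem.Chars.isspace c then aSkipWs cs else c :: cs

-- the quoted-name loop: state (buf, esc), char by char
def aQuoted : List Char → Bool → List Char → List Char
  | [], _, buf => buf
  | c :: cs, esc, buf =>
    if esc then aQuoted cs false (buf ++ [c])
    else if c = '\\' then aQuoted cs true buf
    else if c = '"' then buf
    else aQuoted cs false (buf ++ [c])

-- the bare-token loop: collect text[start:i] while not whitespace and not in "()"
def aBare : List Char → List Char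
  | [] => []
  | c :: cs =>
    if PySem.Chars.isspace c || c = '(' || c = ')' then [] else c :: aBare cs

def symbol_name_py (symbol_block : String) : String :=
  let text := (PySem.Str.lstrip symbol_block).toList
  if PySem.Chars.startswith text "(symbol".toList = false then ""
  else
    match aSkipWs (text.drop 7) with
    | [] => ""
    | c :: cs =>
      if c = '"' then PySem.Str.strip (String.ofList (aQuoted cs false []))
      else PySem.Str.strip (String.ofList (aBare (c :: cs)))

-- ===== PORT B =====
-- Source B's _unquote: direct recursion on the string, no index and no escape flag
def bUnquote : List Char → List Char
  | [] => []
  | c :: cs =>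
    if c = '"' then []
    else if c = '\\' then cs.take 1 ++ bUnquote (cs.drop 1)
    else c :: bUnquote cs
  termination_by cs => cs.length
  decreasing_by
  all_goals simp only [List.length_drop, List.length_cons]
  all_goals omega

def symbol_name_py_alt (symbol_block : String) : String :=
  let text := (PySem.Str.lstrip symbol_block).toList
  if PySem.Chars.startswith text "(symbol".toList = false then ""
  else
    let rest := PySem.Chars.lstrip (text.drop 7)
    if PySem.Chars.startswith rest ['"'] then
      PySem.Str.strip (String.ofList (bUnquote (rest.drop 1)))
    else
      -- next((k for k, ch in enumerate(rest) if ch.isspace() or ch in "()"), len(rest))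
      let j := rest.findIdx (fun ch => PySem.Chars.isspace ch || ch = '(' || ch = ')')
      PySem.Str.strip (String.ofList (rest.take j))

-- ===== PRECONDITION & SPEC =====
def Spec_symbol_name_py (symbol_block : String) (out : String) : Prop := out = symbol_name_py_alt symbol_block
instance (symbol_block : String) (out : String) : Decidable (Spec_symbol_name_py symbol_block out) := by unfold Spec_symbol_name_py; infer_instance

-- ===== CLAIM (what is proved, stated in full; the proofs are below) =====
def Claim_equal_symbol_name_py : Prop := ∀ (symbol_block : String), Dom_symbol_name_py symbol_block → Spec_symbol_name_py symbol_block (symbol_name_py symbol_block)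

-- ===== LEMMAS AND PROOFS =====
theorem aSkipWs_eq (cs : List Char) : aSkipWs cs = PySem.Chars.lstrip cs := by
  show aSkipWs cs = cs.dropWhile PySem.Chars.isspace
  induction cs with
  | nil => rfl
  | cons c cs ih =>
    show (if PySem.Chars.isspace c then aSkipWs cs else c :: cs) = _
    rw [List.dropWhile_cons]
    by_cases h : PySem.Chars.isspace c = true
    · simp [h, ih]
    · simp [h]

theorem aQuoted_eq : ∀ (cs buf : List Char), aQuoted cs false buf = buf ++ bUnquote cs
  | [], buf => by simp [aQuoted, bUnquote]
  | c :: cs, buf => by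
    by_cases hb : c = '\\'
    · subst hb
      cases cs with
      | nil => simp [aQuoted, bUnquote]
      | cons d ds =>
        have := aQuoted_eq ds (buf ++ [d])
        simp [aQuoted, bUnquote, this]
    · by_cases hq : c = '"'
      · subst hq; simp [aQuoted, bUnquote]
      · have := aQuoted_eq cs (buf ++ [c])
        simp [aQuoted, bUnquote, hb, hq, this]
  termination_by cs _ => cs.length

theorem aBare_eq (xs : List Char) :
    aBare xs = xs.take (xs.findIdx (fun ch => PySem.Chars.isspace ch || ch = '(' || ch = ')')) := by
  induction xs with
  | nil => rfl
  | cons c cs ih =>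
    show (if PySem.Chars.isspace c || c = '(' || c = ')' then [] else c :: aBare cs) = _
    rw [List.findIdx_cons]
    by_cases h : (PySem.Chars.isspace c || decide (c = '(') || decide (c = ')')) = true
    · simp [h]
    · simp [h, ih]

-- ===== VERDICT (by name: the statement is the Claim_ definition above) =====
theorem symbol_name_py_spec : Claim_equal_symbol_name_py := by
  intro s _
  unfold Spec_symbol_name_py symbol_name_py symbol_name_py_alt
  rw [show (PySem.Str.lstrip s).toList = PySem.Chars.lstrip s.toList from PySem.Str.toList_lstrip s]
  dsimp only
  rw [aSkipWs_eq]
  by_cases h : PySem.Chars.startswith (PySem.Chars.lstrip s.toList) "(symbol".toList = false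
  · rw [if_pos h, if_pos h]
  · rw [if_neg h, if_neg h]
    cases hr : PySem.Chars.lstrip (List.drop 7 (PySem.Chars.lstrip s.toList)) with
    | nil =>
      rw [show PySem.Chars.startswith ([] : List Char) ['"'] = false from rfl]
      simp only [Bool.false_eq_true, if_false, List.take_nil]
      decide
    | cons c cs =>
      rw [show PySem.Chars.startswith (c :: cs) ['"'] = ('"' == c) from by
        simp [PySem.Chars.startswith, List.isPrefixOf]]
      by_cases hc : c = '"'
      · subst hc
        simp [aQuoted_eq]
      · have hc' : ('"' == c) = false := by
          simp only [beq_eq_false_iff_ne]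
          exact Ne.symm hc
        simp [hc, hc', aBare_eq]
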